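-- pv_equiv track=rewrite | github.com/rnzl/pyCMock | lib/cmock_header_parser.py | count_number_of_pairs_of_braces_in_function
-- ===== SOURCE A (Python) =====
-- def count_number_of_pairs_of_braces_in_function(source):
--     """
--     Return the number of pairs of braces/square brackets in the function provided by the user
--     +source+:: String containing the function to be processed
--     """
--     is_function_start_found = False
--     curr_level = 0
--     total_pairs = 0
--
--     for c in source:
--         if c == '{':
--             curr_level += 1
--             total_pairs += 1
--             is_function_start_found = True
--         elif c == '}':
--             curr_level -= 1
--
--         if is_function_start_found and curr_level == 0: # We reached the end of the inline function body
--             break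
--
--     if curr_level != 0:
--         # Something is fishy about this source, not enough closing braces?
--         # TODO: Should we raise an exception/warining here?
--         total_pairs = 0
--
--     return total_pairs
-- ===== SOURCE B (Python) =====
-- def count_number_of_pairs_of_braces_in_function(source):
--     """
--     Return the number of pairs of braces in the function provided by the user.
--     Two-pass version: build the running-depth table, locate the first balanced
--     boundary at or after the first '{', then count '{' in that prefix.
--     """
--     if '{' not in source:
--         return 0
--     fb = source.index('{')
--     depth = 0
--     depths = [depth := depth + (c == '{') - (c == '}') for c in source]
--     for i in range(fb, len(depths)):
--         if depths[i] == 0: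
--             return source[:i + 1].count('{')
--     return 0
-- ===== Notes on version B (the rewrite author's own statement) =====
-- stated objective: faster
-- what changed: Replaces A's fused per-character Python loop (state machine with early break) by a three-stage pipeline: str.index to find the first opening brace, one comprehension building the running-depth table, then locate the first zero-depth index at or after it and count opening braces in that prefix with str.count.
import Mathlib
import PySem

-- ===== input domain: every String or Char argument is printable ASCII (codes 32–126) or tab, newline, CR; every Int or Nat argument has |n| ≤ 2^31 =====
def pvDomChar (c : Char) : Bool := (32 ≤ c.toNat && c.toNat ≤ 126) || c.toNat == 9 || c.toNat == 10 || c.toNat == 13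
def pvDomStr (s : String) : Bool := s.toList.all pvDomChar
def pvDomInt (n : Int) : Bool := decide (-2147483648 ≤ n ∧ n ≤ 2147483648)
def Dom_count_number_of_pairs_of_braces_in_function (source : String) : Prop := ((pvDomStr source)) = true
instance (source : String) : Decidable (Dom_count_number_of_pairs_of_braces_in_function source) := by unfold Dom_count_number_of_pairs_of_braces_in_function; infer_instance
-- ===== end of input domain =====

-- B decomposes A's fused break-on-balance scan into a build-depth-table pass followed by a
-- locate-then-count pass; same O(n) cost, proved to return the same value everywhere.

-- ===== PORT A =====
-- A's for-loop with its break: returns the (curr_level, total_pairs) state at the break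
-- point (or at list end).
def pvLoopA : List Char → Bool → Int → Int → Int × Int
  | [], _, lvl, tp => (lvl, tp)
  | c :: cs, found, lvl, tp =>
    let found' := if c = '{' then true else found
    let lvl'   := if c = '{' then lvl + 1 else if c = '}' then lvl - 1 else lvl
    let tp'    := if c = '{' then tp + 1 else tp
    if found' = true ∧ lvl' = 0 then (lvl', tp')
    else pvLoopA cs found' lvl' tp'

def count_number_of_pairs_of_braces_in_function (source : String) : Int :=
  let st := pvLoopA source.toList false 0 0
  if st.1 ≠ 0 then 0 else st.2

-- ===== PORT B =====
-- running-depth table: depths[i] = start + (#'{' - #'}') in cs[0..i]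
def pvDepths : Int → List Char → List Int
  | _, [] => []
  | d, c :: cs =>
    let d' := d + (if c = '{' then 1 else 0) - (if c = '}' then 1 else 0)
    d' :: pvDepths d' cs

def count_number_of_pairs_of_braces_in_function_alt (source : String) : Int :=
  let cs := source.toList
  match cs.findIdx? (fun c => c = '{') with
  | none => 0
  | some fb =>
    let depths := pvDepths 0 cs
    match (depths.drop fb).findIdx? (fun d => d = 0) with
    | none => 0
    | some j => ((cs.take (fb + j + 1)).count '{' : Int)

-- ===== PRECONDITION & SPEC =====
def Spec_count_number_of_pairs_of_braces_in_function (source : String) (out : Int) : Prop := out = count_number_of_pairs_of_braces_in_function_alt source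
instance (source : String) (out : Int) : Decidable (Spec_count_number_of_pairs_of_braces_in_function source out) := by unfold Spec_count_number_of_pairs_of_braces_in_function; infer_instance

-- ===== CLAIM (what is proved, stated in full; the proofs are below) =====
def Claim_equal_count_number_of_pairs_of_braces_in_function : Prop := ∀ (source : String), Dom_count_number_of_pairs_of_braces_in_function source → Spec_count_number_of_pairs_of_braces_in_function source (count_number_of_pairs_of_braces_in_function source)

-- ===== LEMMAS AND PROOFS =====

-- reference recursion: A's loop fused with A's final "if curr_level != 0 then 0" check
def pvRef : List Char → Bool → Int → Int → Int
  | [], _, _, _ => 0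
  | c :: cs, found, lvl, tp =>
    let found' := if c = '{' then true else found
    let lvl'   := if c = '{' then lvl + 1 else if c = '}' then lvl - 1 else lvl
    let tp'    := if c = '{' then tp + 1 else tp
    if found' = true ∧ lvl' = 0 then tp'
    else pvRef cs found' lvl' tp'

-- A equals the reference recursion, given the loop invariants
theorem pvLoopA_eq_ref : ∀ (cs : List Char) (found : Bool) (lvl tp : Int),
    ¬ (found = true ∧ lvl = 0) → (found = false → tp = 0) →
    (let st := pvLoopA cs found lvl tp; if st.1 ≠ 0 then 0 else st.2) = pvRef cs found lvl tp := by
  intro cs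
  induction cs with
  | nil =>
    intro found lvl tp hnb h0
    simp only [pvLoopA, pvRef]
    by_cases h : lvl = 0
    · subst h
      have : found = false := by
        cases found with
        | false => rfl
        | true => exact absurd ⟨rfl, rfl⟩ hnb
      simp [h0 this]
    · simp [h]
  | cons c cs ih =>
    intro found lvl tp hnb h0
    simp only [pvLoopA, pvRef]
    by_cases hb : ((if c = '{' then true else found) = true ∧ (if c = '{' then lvl + 1 else if c = '}' then lvl - 1 else lvl) = 0)
    · simp only [hb, if_pos hb]
      simp [hb.2]
    · simp only [if_neg hb]
      apply ih
      · exact hb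
      · intro hf
        by_cases hc : c = '{'
        · simp [hc] at hf
        · simp [hc] at hf ⊢
          exact h0 hf

-- after the first '{' has been seen: the reference recursion is "find first zero depth,
-- then add the '{' count of the consumed prefix"
theorem pvRef_found : ∀ (cs : List Char) (lvl tp : Int),
    pvRef cs true lvl tp =
      (match (pvDepths lvl cs).findIdx? (fun d => d = 0) with
        | none => 0
        | some j => tp + ((cs.take (j + 1)).count '{' : Int)) := by
  intro cs
  induction cs with
  | nil => intro lvl tp; simp [pvRef, pvDepths]
  | cons c cs ih =>
    intro lvl tp
    have step : (if c = '{' then lvl + 1 else if c = '}' then lvl - 1 else lvl)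
        = lvl + (if c = '{' then 1 else 0) - (if c = '}' then 1 else 0) := by
      by_cases hc : c = '{' <;> by_cases hc2 : c = '}' <;> simp_all <;> ring
    simp only [pvRef, pvDepths, step, List.findIdx?_cons]
    by_cases hz : lvl + (if c = '{' then 1 else 0) - (if c = '}' then 1 else 0) = 0
    · rw [if_pos ⟨by simp, hz⟩]
      simp only [hz, decide_true, if_pos rfl]
      by_cases hc : c = '{' <;> simp [hc, List.count_cons]
    · rw [if_neg (by simp [hz])]
      rw [show (if c = '{' then true else true) = true by simp]
      rw [ih]
      rw [show (decide ((lvl + (if c = '{' then 1 else 0) - (if c = '}' then 1 else 0)) = 0)) = false by simp [hz]]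
      simp only [Bool.false_eq_true, if_false]
      cases hfi : (pvDepths (lvl + (if c = '{' then 1 else 0) - (if c = '}' then 1 else 0)) cs).findIdx? (fun d => d = 0) with
      | none => simp [hfi]
      | some j =>
        simp only [hfi, Option.map_some]
        rw [List.take_succ_cons, List.count_cons]
        by_cases hc : c = '{' <;> simp [hc] <;> push_cast <;> ring

-- before the first '{': the reference recursion equals B's locate-then-count computation
theorem pvRef_notfound : ∀ (cs : List Char) (lvl : Int),
    pvRef cs false lvl 0 =
      (match cs.findIdx? (fun c => c = '{') with
        | none => 0
        | some fb =>
          match ((pvDepths lvl cs).drop fb).findIdx? (fun d => d = 0) with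
          | none => 0
          | some j => ((cs.take (fb + j + 1)).count '{' : Int)) := by
  intro cs
  induction cs with
  | nil => intro lvl; simp [pvRef]
  | cons c cs ih =>
    intro lvl
    by_cases hc : c = '{'
    · subst hc
      have e1 : pvRef ('{' :: cs) false lvl 0 =
          if lvl + 1 = 0 then 1 else pvRef cs true (lvl + 1) 1 := by
        simp [pvRef]
      have e3 : List.findIdx? (fun c => decide (c = '{')) ('{' :: cs) = some 0 := by
        simp [List.findIdx?_cons]
      rw [e1]
      simp only [e3]
      have e2 : pvDepths lvl ('{' :: cs) = (lvl + 1) :: pvDepths (lvl + 1) cs := by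
        simp [pvDepths]
      simp only [e2, List.drop_zero, List.findIdx?_cons]
      by_cases hz : lvl + 1 = 0
      · simp [hz]
      · rw [if_neg hz, pvRef_found]
        rw [show (decide ((lvl + 1 : Int) = 0)) = false by simp [hz]]
        simp only [Bool.false_eq_true, if_false]
        cases hfi : (pvDepths (lvl + 1) cs).findIdx? (fun d => d = 0) with
        | none => simp [hz]
        | some j =>
          simp only [Option.map_some, hz, if_false]
          have : (0 : Nat) + (j + 1) + 1 = (j + 1) + 1 := by omega
          rw [this, List.take_succ_cons, List.count_cons]
          simp [add_comm]
    · have lvlstep : (if c = '{' then lvl + 1 else if c = '}' then lvl - 1 else lvl)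
          = lvl + (if c = '{' then 1 else 0) - (if c = '}' then 1 else 0) := by
        by_cases hc2 : c = '}' <;> simp [hc, hc2] <;> ring
      have e1 : pvRef (c :: cs) false lvl 0 =
          pvRef cs false (lvl + (if c = '{' then 1 else 0) - (if c = '}' then 1 else 0)) 0 := by
        simp only [pvRef, lvlstep]
        rw [if_neg (by simp [hc])]
        simp [hc]
      have e3 : List.findIdx? (fun c => decide (c = '{')) (c :: cs) =
          (List.findIdx? (fun c => decide (c = '{')) cs).map (· + 1) := by
        simp [List.findIdx?_cons, hc]
      have e2 : pvDepths lvl (c :: cs) =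
          (lvl + (if c = '{' then 1 else 0) - (if c = '}' then 1 else 0)) ::
            pvDepths (lvl + (if c = '{' then 1 else 0) - (if c = '}' then 1 else 0)) cs := by
        simp [pvDepths]
      rw [e1, ih]
      simp only [e3, e2]
      cases hfb : List.findIdx? (fun c => decide (c = '{')) cs with
      | none => simp
      | some fb =>
        simp only [Option.map_some]
        have hdrop : ((lvl + (if c = '{' then 1 else 0) - (if c = '}' then 1 else 0)) ::
            pvDepths (lvl + (if c = '{' then 1 else 0) - (if c = '}' then 1 else 0)) cs).drop (fb + 1)
            = (pvDepths (lvl + (if c = '{' then 1 else 0) - (if c = '}' then 1 else 0)) cs).drop fb := by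
          simp
        rw [hdrop]
        cases hfj : ((pvDepths (lvl + (if c = '{' then 1 else 0) - (if c = '}' then 1 else 0)) cs).drop fb).findIdx? (fun d => d = 0) with
        | none => simp
        | some j =>
          simp only
          have : fb + 1 + j + 1 = (fb + j + 1) + 1 := by omega
          rw [this, List.take_succ_cons, List.count_cons]
          simp [hc]

-- ===== VERDICT (by name: the statement is the Claim_ definition above) =====
theorem count_number_of_pairs_of_braces_in_function_spec : Claim_equal_count_number_of_pairs_of_braces_in_function := by
  intro source _
  unfold Spec_count_number_of_pairs_of_braces_in_function
  unfold count_number_of_pairs_of_braces_in_function count_number_of_pairs_of_braces_in_function_alt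
  rw [show (let st := pvLoopA source.toList false 0 0; if st.1 ≠ 0 then 0 else st.2)
        = pvRef source.toList false 0 0 from pvLoopA_eq_ref _ _ _ _ (by simp) (fun _ => rfl)]
  rw [pvRef_notfound]
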